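-- pv_equiv track=rewrite | github.com/ChrisStewart132/CS | backtracking.py | decimal_numbers
-- ===== SOURCE A (Python) =====
-- def dfs_backtrack(output, is_solution, add_to_output, children, candidate=""):
--     """
--         output: container solutions are added to
--         is_solution: boolean function, true if candidate is a solution
--         add_to_output: function that adds the input candidate to the output container
--         children: function that returns child nodes/variant of the given node/candidate
--     """
--     if is_solution(candidate):
--         add_to_output(candidate, output)
--     else:
--         for child_candidate in children(candidate):
--             dfs_backtrack(output, is_solution, add_to_output, children, child_candidate)
--
-- def decimal_numbers(desired_length, starting_candidate=""):
--     def is_solution(candidate):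
--         return len(candidate) == desired_length
--     def add_to_output(candidate, output):
--         output.append(candidate)
--     def children(candidate):
--         return [candidate + str(x) for x in range(10)]
--     solutions = []
--     dfs_backtrack(solutions, is_solution, add_to_output, children, starting_candidate)
--     return solutions
-- ===== SOURCE B (Python) =====
-- def decimal_numbers(desired_length, starting_candidate=""):
--     # breadth-first level expansion instead of recursive DFS: each round
--     # appends every digit to every candidate; lexicographic order is preserved
--     results = [starting_candidate]
--     while len(results[0]) < desired_length:
--         results = [s + d for s in results for d in "0123456789"]
--     return results
-- ===== Notes on version B (the rewrite author's own statement) =====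
-- stated objective: simpler
-- what changed: Replaces the higher-order recursive DFS backtracking with an iterative breadth-first level expansion: a single loop that appends every digit to every candidate once per free position.
import Mathlib
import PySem

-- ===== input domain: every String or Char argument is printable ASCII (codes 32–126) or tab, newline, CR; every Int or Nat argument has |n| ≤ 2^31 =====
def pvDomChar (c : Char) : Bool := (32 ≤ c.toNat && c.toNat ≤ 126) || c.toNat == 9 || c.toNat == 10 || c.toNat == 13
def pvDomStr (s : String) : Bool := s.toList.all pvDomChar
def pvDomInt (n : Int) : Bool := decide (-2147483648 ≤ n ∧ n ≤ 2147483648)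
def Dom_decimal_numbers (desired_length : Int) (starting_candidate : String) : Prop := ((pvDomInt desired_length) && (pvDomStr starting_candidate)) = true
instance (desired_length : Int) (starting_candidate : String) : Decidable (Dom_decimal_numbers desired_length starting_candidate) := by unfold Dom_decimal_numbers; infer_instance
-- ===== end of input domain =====

-- B replaces the recursive DFS backtracking with an iterative breadth-first level
-- expansion (one loop appending each digit to each candidate), same output order.

-- ===== PORT A =====
-- A's dfs_backtrack specialised to the closures of decimal_numbers; the candidate is
-- kept as List Char, the output accumulator is `acc`.  The Python recursion does not
-- terminate when len(candidate) > desired_length (RecursionError); the port carries a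
-- fuel argument (desired_length - len(candidate)) purely to make that same recursion
-- total — inside Pre_ the fuel guard is never reached.
def dfsA (desired_length : Int) (fuel : Nat) (candidate : List Char) (acc : List String) : List String :=
  if (candidate.length : Int) = desired_length then
    acc ++ [String.mk candidate]
  else
    match fuel with
    | 0 => acc   -- unreachable inside Pre_: Python raises RecursionError here
    | fuel' + 1 =>
      -- children(candidate) = [candidate + str(x) for x in range(10)]
      let kids := (PySem.List.pyRange 0 10 1).map
        (fun x => candidate ++ (PySem.Int.toStr x).toList)
      kids.foldl (fun a k => dfsA desired_length fuel' k a) acc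

def decimal_numbers (desired_length : Int) (starting_candidate : String) : List String :=
  dfsA desired_length (desired_length - (starting_candidate.toList.length : Int)).toNat
    starting_candidate.toList []

-- ===== PORT B =====
-- one expansion round: [s + d for s in results for d in "0123456789"]
def expandAll (rs : List (List Char)) : List (List Char) :=
  rs.flatMap (fun s => ("0123456789".toList).map (fun d => s ++ [d]))

-- the while loop of B; terminates because each round lengthens results[0] by one.
-- The fuel mirrors desired_length - len(results[0]) and is only a termination measure.
def loopB (desired_length : Int) (fuel : Nat) (rs : List (List Char)) : List (List Char) :=
  match rs with
  | [] => []   -- unreachable: results is never empty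
  | r :: _ =>
    if ((r.length : Int) < desired_length) then
      match fuel with
      | 0 => rs   -- unreachable inside Pre_
      | fuel' + 1 => loopB desired_length fuel' (expandAll rs)
    else rs

def decimal_numbers_alt (desired_length : Int) (starting_candidate : String) : List String :=
  (loopB desired_length (desired_length - (starting_candidate.toList.length : Int)).toNat
    [starting_candidate.toList]).map String.mk

-- ===== PRECONDITION & SPEC =====
-- Pre_ excludes exactly the inputs where the starting candidate is already longer than
-- desired_length: there A's DFS recurses forever and raises RecursionError.
def Pre_decimal_numbers (desired_length : Int) (starting_candidate : String) : Prop :=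
  (starting_candidate.toList.length : Int) ≤ desired_length
instance (desired_length : Int) (starting_candidate : String) : Decidable (Pre_decimal_numbers desired_length starting_candidate) := by unfold Pre_decimal_numbers; infer_instance

def pvWitness_decimal_numbers : Int × String := (2, "7")

def Spec_decimal_numbers (desired_length : Int) (starting_candidate : String) (out : List String) : Prop := out = decimal_numbers_alt desired_length starting_candidate
instance (desired_length : Int) (starting_candidate : String) (out : List String) : Decidable (Spec_decimal_numbers desired_length starting_candidate out) := by unfold Spec_decimal_numbers; infer_instance

-- ===== CLAIM (what is proved, stated in full; the proofs are below) =====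
def Claim_equal_decimal_numbers : Prop := ∀ (desired_length : Int) (starting_candidate : String), Dom_decimal_numbers desired_length starting_candidate → Pre_decimal_numbers desired_length starting_candidate → Spec_decimal_numbers desired_length starting_candidate (decimal_numbers desired_length starting_candidate)

-- ===== LEMMAS AND PROOFS =====

-- all digit suffixes of length n, lexicographic, first digit outermost
def prodRep : Nat → List (List Char)
  | 0 => [[]]
  | n + 1 => ("0123456789".toList).flatMap (fun d => (prodRep n).map (fun t => d :: t))

lemma dfsA_eq (desired_length : Int) :
    ∀ (fuel : Nat) (c : List Char) (acc : List String),
      (c.length : Int) + fuel = desired_length →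
      dfsA desired_length fuel c acc
        = acc ++ (prodRep fuel).map (fun t => String.mk (c ++ t)) := by
  intro fuel
  induction fuel with
  | zero =>
    intro c acc h
    simp only [Nat.cast_zero, add_zero] at h
    simp [dfsA, h, prodRep]
  | succ n ih =>
    intro c acc h
    have hne : ¬ ((c.length : Int) = desired_length) := by omega
    rw [dfsA]
    simp only [hne, if_false]
    have hfold :
        ((PySem.List.pyRange 0 10 1).map
            (fun x => c ++ (PySem.Int.toStr x).toList)).foldl
          (fun a k => dfsA desired_length n k a) acc
        = acc ++ ((PySem.List.pyRange 0 10 1).map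
            (fun x => c ++ (PySem.Int.toStr x).toList)).flatMap
            (fun k => (prodRep n).map (fun t => String.mk (k ++ t))) := by
      have hcong : ∀ (a : List String) (k : List Char),
          k ∈ (PySem.List.pyRange 0 10 1).map (fun x => c ++ (PySem.Int.toStr x).toList) →
          dfsA desired_length n k a
            = a ++ (prodRep n).map (fun t => String.mk (k ++ t)) := by
        intro a k hk
        apply ih
        rcases List.mem_map.mp hk with ⟨x, hx, rfl⟩
        have hx10 : x ∈ ([0,1,2,3,4,5,6,7,8,9] : List Int) := by
          have hrr : PySem.List.pyRange 0 10 1 = [0,1,2,3,4,5,6,7,8,9] := by decide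
          rw [hrr] at hx; exact hx
        have h1 : (PySem.Int.toStr x).toList.length = 1 := by
          fin_cases hx10 <;> decide
        simp only [List.length_append, h1]
        push_cast
        push_cast at h
        omega
      rw [PySem.List.foldl_congr_mem _ _ _ _ hcong,
        PySem.List.foldl_append_eq_flatMap]
    rw [hfold]
    congr 1
    have hr : PySem.List.pyRange 0 10 1 = [0,1,2,3,4,5,6,7,8,9] := by decide
    rw [hr, prodRep]
    simp [List.flatMap_cons, List.map_append, List.map_map, List.append_assoc]
    rfl

lemma loopB_eq (desired_length : Int) :
    ∀ (fuel : Nat) (rs : List (List Char)) (L : Nat), rs ≠ [] →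
      (∀ x ∈ rs, x.length = L) →
      (L : Int) + fuel = desired_length →
      loopB desired_length fuel rs
        = rs.flatMap (fun c => (prodRep fuel).map (fun t => c ++ t)) := by
  intro fuel
  induction fuel with
  | zero =>
    intro rs L hne hlen h
    match rs with
    | [] => exact absurd rfl hne
    | r :: rest =>
      have hr : (r.length : Int) = desired_length := by
        rw [hlen r (List.mem_cons_self ..)]; push_cast at h ⊢; omega
      rw [loopB]
      simp only [hr, lt_self_iff_false, if_false, prodRep]
      simp
  | succ n ih =>
    intro rs L hne hlen h
    match rs with
    | [] => exact absurd rfl hne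
    | r :: rest =>
      have hr : (r.length : Int) < desired_length := by
        rw [hlen r (List.mem_cons_self ..)]; push_cast at h ⊢; omega
      rw [loopB]
      simp only [hr, if_true]
      have hmem : (r ++ ['0']) ∈ expandAll (r :: rest) := by
        simp only [expandAll, List.mem_flatMap]
        exact ⟨r, List.mem_cons_self .., List.mem_map.mpr ⟨'0', by decide, rfl⟩⟩
      have hne' : expandAll (r :: rest) ≠ [] := List.ne_nil_of_mem hmem
      have hlen' : ∀ x ∈ expandAll (r :: rest), x.length = L + 1 := by
        intro x hx
        simp only [expandAll, List.mem_flatMap, List.mem_map] at hx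
        rcases hx with ⟨s, hs, d, _, rfl⟩
        simp [hlen s hs]
      have hrec := ih (expandAll (r :: rest)) (L + 1) hne' hlen'
        (by push_cast at h ⊢; omega)
      rw [hrec]
      simp only [expandAll, List.flatMap_assoc, prodRep]
      congr 1
      funext s
      rw [List.flatMap_map]
      simp only [List.map_flatMap, List.map_map]
      congr 1
      funext d
      congr 1
      funext t
      simp

-- ===== VERDICT (by name: the statement is the Claim_ definition above) =====
theorem decimal_numbers_spec : Claim_equal_decimal_numbers := by
  intro d s _ hpre
  unfold Spec_decimal_numbers decimal_numbers decimal_numbers_alt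
  have hf : ((s.toList.length : Int)) + ((d - (s.toList.length : Int)).toNat : Int) = d := by
    unfold Pre_decimal_numbers at hpre; omega
  rw [dfsA_eq d _ _ _ hf,
      loopB_eq d _ [s.toList] s.toList.length (by simp) (by simp) hf]
  simp [List.map_map, Function.comp]
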